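-- pv_equiv track=rewrite | github.com/epam/dial-mind-map-backend | dial_rag/retrievers/description_retriever/description_retriever.py | split_text_by_separators
-- ===== SOURCE A (Python) =====
-- def split_text_by_separators(
--     text: str, separators: list[str], min_word_count: int
-- ) -> list[str]:
--     """
--     Split text by separators
--     """
--     result = []
--     current_chunk = ""
--     for char in text:
--         if char in separators:  # it's a separator
--             # we need to have at least min_word_count words in the chunk
--             if current_chunk and len(current_chunk.split()) >= min_word_count:
--                 result.append(current_chunk)
--                 current_chunk = ""
--             else:
--                 current_chunk += char
--         else:
--             current_chunk += char
--     if current_chunk: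
--         result.append(current_chunk)
--     return result
-- ===== SOURCE B (Python) =====
-- def _count_step(wc, prev_ws, ch):
--     if ch.isspace():
--         return wc, True
--     return (wc + 1 if prev_ws else wc), False
--
--
-- def split_text_by_separators(
--     text: str, separators: list[str], min_word_count: int
-- ) -> list[str]:
--     """
--     Split text by separators — single pass, set membership, incremental
--     word counting (no re-split of the growing chunk), chars joined once.
--     """
--     seps = set(separators)
--     result = []
--     chunk = []        # characters of the current chunk
--     wc = 0            # == len("".join(chunk).split())
--     prev_ws = True    # last char of chunk is whitespace (or chunk empty)
--     for ch in text:
--         if ch in seps and chunk and wc >= min_word_count: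
--             result.append("".join(chunk))
--             chunk = []
--             wc = 0
--             prev_ws = True
--         else:
--             chunk.append(ch)
--             wc, prev_ws = _count_step(wc, prev_ws, ch)
--     if chunk:
--         result.append("".join(chunk))
--     return result
-- ===== Notes on version B (the rewrite author's own statement) =====
-- stated objective: faster
-- what changed: Instead of re-splitting the whole growing chunk at every separator, B makes a single pass keeping an incremental word count and a trailing-whitespace flag, tests separator membership against a set, and accumulates chunk characters in a list joined once per flush.
import Mathlib
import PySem

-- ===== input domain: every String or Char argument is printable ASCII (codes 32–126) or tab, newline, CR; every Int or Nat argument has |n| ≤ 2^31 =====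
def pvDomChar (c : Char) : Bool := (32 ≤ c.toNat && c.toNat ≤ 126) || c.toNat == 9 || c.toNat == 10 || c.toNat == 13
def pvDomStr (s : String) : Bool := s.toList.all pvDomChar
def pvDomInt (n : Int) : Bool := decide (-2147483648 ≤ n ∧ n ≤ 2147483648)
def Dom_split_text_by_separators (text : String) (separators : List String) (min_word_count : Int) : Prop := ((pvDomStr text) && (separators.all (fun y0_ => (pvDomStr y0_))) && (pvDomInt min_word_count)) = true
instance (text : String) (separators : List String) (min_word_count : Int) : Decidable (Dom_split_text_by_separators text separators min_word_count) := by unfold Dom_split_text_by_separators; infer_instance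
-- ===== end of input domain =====

-- B replaces A's per-separator re-split of the growing chunk (O(n^2)) by a single pass with
-- an incremental word count; equivalence of the return values is proved below.

-- ===== PORT A =====
-- one iteration of A's `for char in text` loop; state = (result, current_chunk as chars)
def pvStepA (separators : List String) (min_word_count : Int)
    (s : List String × List Char) (c : Char) : List String × List Char :=
  if String.mk [c] ∈ separators then
    if s.2 ≠ [] ∧ min_word_count ≤ ((PySem.Chars.split₀ s.2).length : Int) then
      (s.1 ++ [String.mk s.2], [])
    else
      (s.1, s.2 ++ [c])
  else
    (s.1, s.2 ++ [c])

def split_text_by_separators (text : String) (separators : List String) (min_word_count : Int) : List String :=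
  let s := text.toList.foldl (pvStepA separators min_word_count) ([], [])
  if s.2 ≠ [] then s.1 ++ [String.mk s.2] else s.1

-- ===== PORT B =====
-- Source B's _count_step: incremental word count, (wc, prev_ws)
def pvCountStep (s : Nat × Bool) (c : Char) : Nat × Bool :=
  if PySem.Chars.isspace c then (s.1, true)
  else ((if s.2 then s.1 + 1 else s.1), false)

-- one iteration of B's loop; state = (result, chunk chars, wc, prev_ws)
def pvStepB (seps : List String) (min_word_count : Int)
    (s : List String × List Char × Nat × Bool) (c : Char) : List String × List Char × Nat × Bool :=
  if String.mk [c] ∈ seps ∧ s.2.1 ≠ [] ∧ min_word_count ≤ (s.2.2.1 : Int) then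
    (s.1 ++ [String.mk s.2.1], [], 0, true)
  else
    (s.1, s.2.1 ++ [c], pvCountStep s.2.2 c)

def split_text_by_separators_alt (text : String) (separators : List String) (min_word_count : Int) : List String :=
  let seps := PySem.Set.ofList separators
  let s := text.toList.foldl (pvStepB seps min_word_count) ([], [], 0, true)
  if s.2.1 ≠ [] then s.1 ++ [String.mk s.2.1] else s.1

-- ===== PRECONDITION & SPEC =====
def Spec_split_text_by_separators (text : String) (separators : List String) (min_word_count : Int) (out : List String) : Prop := out = split_text_by_separators_alt text separators min_word_count
instance (text : String) (separators : List String) (min_word_count : Int) (out : List String) : Decidable (Spec_split_text_by_separators text separators min_word_count out) := by unfold Spec_split_text_by_separators; infer_instance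

-- ===== CLAIM (what is proved, stated in full; the proofs are below) =====
def Claim_equal_split_text_by_separators : Prop := ∀ (text : String) (separators : List String) (min_word_count : Int), Dom_split_text_by_separators text separators min_word_count → Spec_split_text_by_separators text separators min_word_count (split_text_by_separators text separators min_word_count)

-- ===== LEMMAS AND PROOFS =====

-- B's counter is additive in its first component
lemma foldl_pvCountStep_add (cs : List Char) (n k : Nat) (b : Bool) :
    (cs.foldl pvCountStep (n + k, b)).1 = (cs.foldl pvCountStep (n, b)).1 + k := by
  induction cs generalizing n b with
  | nil => rfl
  | cons c cs ih =>
      have hk : n + k + 1 = (n + 1) + k := by omega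
      by_cases hc : PySem.Chars.isspace c <;> cases b <;>
        simp [List.foldl, pvCountStep, hc, hk, ih]

-- the word count split₀ computes, expressed through B's incremental counter
lemma go_length (cs cur : List Char) (acc : List (List Char)) :
    (PySem.Chars.split₀.go cs cur acc).length
      = acc.length + (cs.foldl pvCountStep ((if cur.isEmpty then 0 else 1), cur.isEmpty)).1 := by
  induction cs generalizing cur acc with
  | nil => cases cur <;> simp [PySem.Chars.split₀.go]
  | cons c cs ih =>
      by_cases hc : PySem.Chars.isspace c
      · cases cur with
        | nil => simpa [PySem.Chars.split₀.go, hc, List.foldl, pvCountStep] using ih [] acc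
        | cons x xs =>
            have h1 : (cs.foldl pvCountStep (1, true)).1
                = (cs.foldl pvCountStep (0, true)).1 + 1 := by
              simpa using foldl_pvCountStep_add cs 0 1 true
            have h2 := ih [] ((x :: xs).reverse :: acc)
            simp [PySem.Chars.split₀.go, hc, List.foldl, pvCountStep] at h2 ⊢
            omega
      · cases cur <;>
          simpa [PySem.Chars.split₀.go, hc, List.foldl, pvCountStep] using ih (c :: _) acc

lemma split₀_length (cs : List Char) :
    (PySem.Chars.split₀ cs).length = (cs.foldl pvCountStep (0, true)).1 := by
  simpa using go_length cs [] []

-- the two loops run in lock step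
lemma loop_eq (separators : List String) (m : Int) (cs : List Char)
    (res : List String) (chunk : List Char) :
    cs.foldl (pvStepB (PySem.Set.ofList separators) m) (res, chunk, chunk.foldl pvCountStep (0, true))
      = ((cs.foldl (pvStepA separators m) (res, chunk)).1,
         (cs.foldl (pvStepA separators m) (res, chunk)).2,
         (cs.foldl (pvStepA separators m) (res, chunk)).2.foldl pvCountStep (0, true)) := by
  induction cs generalizing res chunk with
  | nil => rfl
  | cons c cs ih =>
      have hmem : (String.mk [c] ∈ PySem.Set.ofList separators) ↔ String.mk [c] ∈ separators :=
        PySem.Set.mem_ofList separators (String.mk [c])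
      by_cases hm : String.mk [c] ∈ separators
      · by_cases hf : chunk ≠ [] ∧ m ≤ ((PySem.Chars.split₀ chunk).length : Int)
        · -- flush branch on both sides
          have hf' : String.mk [c] ∈ PySem.Set.ofList separators ∧ chunk ≠ []
              ∧ m ≤ ((chunk.foldl pvCountStep (0, true)).1 : Int) := by
            refine ⟨hmem.mpr hm, hf.1, ?_⟩
            simpa [split₀_length chunk] using hf.2
          simp only [List.foldl, pvStepA, pvStepB, if_pos hm, if_pos hf, if_pos hf']
          simpa using ih (res ++ [String.mk chunk]) []
        · -- append branch
          have hf' : ¬ (String.mk [c] ∈ PySem.Set.ofList separators ∧ chunk ≠ []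
              ∧ m ≤ ((chunk.foldl pvCountStep (0, true)).1 : Int)) := by
            rw [← split₀_length chunk]
            exact fun h => hf ⟨h.2.1, h.2.2⟩
          simp only [List.foldl, pvStepA, pvStepB, if_pos hm, if_neg hf, if_neg hf']
          have : (chunk ++ [c]).foldl pvCountStep (0, true)
              = pvCountStep (chunk.foldl pvCountStep (0, true)) c := by
            simp [List.foldl_append]
          rw [← this]
          exact ih res (chunk ++ [c])
      · have hf' : ¬ (String.mk [c] ∈ PySem.Set.ofList separators ∧ chunk ≠ []
            ∧ m ≤ ((chunk.foldl pvCountStep (0, true)).1 : Int)) := by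
          exact fun h => hm (hmem.mp h.1)
        simp only [List.foldl, pvStepA, pvStepB, if_neg hm, if_neg hf']
        have : (chunk ++ [c]).foldl pvCountStep (0, true)
            = pvCountStep (chunk.foldl pvCountStep (0, true)) c := by
          simp [List.foldl_append]
        rw [← this]
        exact ih res (chunk ++ [c])

-- ===== VERDICT (by name: the statement is the Claim_ definition above) =====
theorem split_text_by_separators_spec : Claim_equal_split_text_by_separators := by
  intro text separators min_word_count _
  unfold Spec_split_text_by_separators split_text_by_separators split_text_by_separators_alt
  have h := loop_eq separators min_word_count text.toList [] []
  simp only [List.foldl_nil] at h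
  dsimp only
  rw [h]
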